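-- pv_equiv track=rewrite | github.com/esun0087/euler | pe539.py | get_lat_digit
-- ===== SOURCE A (Python) =====
-- def get_lat_digit(digits):
--     state = [1, -1]
--     index = 0
--     step = state[index]
--     s = 0
--     while len(digits) > 1:
--         digits = digits[::step]
--         digits = digits[1::2]
--         digits = digits[::step]
--         index = 1 - index
--         step = state[index]
--         s += 1
--     return digits[0]
-- ===== SOURCE B (Python) =====
-- def _surv(n, left):
--     # surviving index of an n-element list when elimination starts
--     # from the left (left=True) or from the right (left=False)
--     if n == 1:
--         return 0
--     j = _surv(n // 2, not left)
--     if left: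
--         return 2 * j + 1
--     return 2 * j + n % 2
--
--
-- def get_lat_digit(digits):
--     return digits[_surv(len(digits), True)]
-- ===== Notes on version B (the rewrite author's own statement) =====
-- stated objective: faster
-- what changed: B computes the surviving index directly with an alternating-direction Josephus-style index recurrence on the length (O(log n) arithmetic) and indexes once, instead of A's repeated slicing/reversing that copies the list each round.
import Mathlib
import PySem

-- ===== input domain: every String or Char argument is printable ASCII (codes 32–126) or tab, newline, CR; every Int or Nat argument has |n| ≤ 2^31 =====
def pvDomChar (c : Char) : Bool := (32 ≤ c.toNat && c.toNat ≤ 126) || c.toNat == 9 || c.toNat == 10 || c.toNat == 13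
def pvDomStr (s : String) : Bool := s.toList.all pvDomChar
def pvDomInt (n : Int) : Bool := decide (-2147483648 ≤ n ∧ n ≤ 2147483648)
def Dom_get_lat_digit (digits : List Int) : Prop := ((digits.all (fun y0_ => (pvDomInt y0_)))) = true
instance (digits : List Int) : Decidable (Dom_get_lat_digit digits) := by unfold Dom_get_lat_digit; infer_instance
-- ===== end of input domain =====

-- B is an O(log n) index recurrence replacing A's O(n) round-by-round slicing; equal wherever A returns (nonempty input).

-- ===== PORT A =====
-- xs[::st] for st = 1 (the value state[0] takes)
theorem pvFilterMapRange (l : List Int) :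
    List.filterMap (fun x => l[x]?) (List.range l.length) = l := by
  induction l using List.reverseRecOn with
  | nil => simp
  | append_singleton xs x ih =>
    simp only [List.length_append, List.length_singleton, List.range_succ, List.filterMap_append]
    rw [List.filterMap_congr (g := fun i => xs[i]?) ?_]
    · simp [ih]
    · intro i hi
      simp only [List.mem_range] at hi
      rw [List.getElem?_append_left hi]

theorem pvSliceOne (l : List Int) : PySem.List.slice? l none none 1 = some l := by
  simp only [PySem.List.slice?, PySem.List.sliceIndices]
  norm_num
  rw [show (if 0 < l.length then l.length else 0) = l.length by split <;> omega]
  exact pvFilterMapRange l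

-- xs[1::2] keeps the odd positions
theorem pvSliceOddTwo (l : List Int) :
    PySem.List.slice? l (some 1) none 2 =
      some ((List.range (l.length / 2)).map (fun k => l.getD (2 * k + 1) 0)) := by
  simp only [PySem.List.slice?, PySem.List.sliceIndices]
  norm_num
  by_cases h : 1 < l.length
  · have hmin : min (1 : Int) (l.length : Int) = 1 := by omega
    have hcnt : (((l.length : Int) - min 1 (l.length : Int) + 2 - 1) / 2).toNat = l.length / 2 := by
      rw [hmin]; omega
    rw [if_pos h, hcnt, hmin]
    rw [List.filterMap_congr (g := fun x => some (l.getD (2 * x + 1) 0)) ?_]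
    · simp
    · intro x hx
      simp only [List.mem_range] at hx
      have hi : (1 + 2 * (x : Int)).toNat = 2 * x + 1 := by omega
      have hlt : 2 * x + 1 < l.length := by omega
      rw [hi, List.getElem?_eq_getElem hlt]
      simp [List.getElem?_eq_getElem hlt]
  · have h2 : l.length / 2 = 0 := by omega
    rw [if_neg h, h2]
    simp

-- a pyGet? hit is a member of the list (used only to bound `step`)
theorem pvPyGetMem {α : Type} (xs : List α) (i : Int) (a : α)
    (h : PySem.List.pyGet? xs i = some a) : a ∈ xs := by
  simp only [PySem.List.pyGet?, Option.bind_eq_some_iff] at h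
  obtain ⟨k, _, hk⟩ := h
  exact List.mem_of_getElem? hk

-- the eliminated list of one round is strictly shorter (termination of A's while loop)
theorem pvRoundLt (digits : List Int) (index : Int) (h : 1 < digits.length) :
    ((PySem.List.slice?
        ((PySem.List.slice?
            ((PySem.List.slice? digits none none
                ((PySem.List.pyGet? ([1, -1] : List Int) index).getD 0)).getD [])
          (some 1) none 2).getD [])
        none none ((PySem.List.pyGet? ([1, -1] : List Int) index).getD 0)).getD []).length
      < digits.length := by
  set st := (PySem.List.pyGet? ([1, -1] : List Int) index).getD 0 with hst
  have hcases : st = 1 ∨ st = -1 ∨ st = 0 := by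
    rw [hst]
    cases h' : PySem.List.pyGet? ([1, -1] : List Int) index with
    | none => simp
    | some a =>
      have := pvPyGetMem _ _ _ h'
      simp only [List.mem_cons, List.not_mem_nil, or_false] at this
      rcases this with h1 | h1 <;> simp [h1]
  rcases hcases with h1 | h1 | h1
  · rw [h1, pvSliceOne digits, Option.getD_some, pvSliceOddTwo, Option.getD_some, pvSliceOne,
      Option.getD_some, List.length_map, List.length_range]
    omega
  · rw [h1, PySem.List.slice?_none_none_neg_one, Option.getD_some, pvSliceOddTwo,
      Option.getD_some, PySem.List.slice?_none_none_neg_one, Option.getD_some,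
      List.length_reverse, List.length_map, List.length_range, List.length_reverse]
    omega
  · have e0 : ∀ (m : List Int), PySem.List.slice? m none none 0 = none := by
      intro m; simp [PySem.List.slice?]
    rw [h1, e0, Option.getD_none]
    simp only [List.length_nil]
    omega

-- the while loop of A; step is state[index] of the current round
def get_lat_digit_go (digits : List Int) (index : Int) (s : Int) : Int :=
  if h : 1 < digits.length then
    let step := (PySem.List.pyGet? ([1, -1] : List Int) index).getD 0
    let d1 := (PySem.List.slice? digits none none step).getD []
    let d2 := (PySem.List.slice? d1 (some 1) none 2).getD []
    let d3 := (PySem.List.slice? d2 none none step).getD []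
    get_lat_digit_go d3 (1 - index) (s + 1)
  else
    (PySem.List.pyGet? digits 0).getD 0
termination_by digits.length
decreasing_by
  exact pvRoundLt digits index h

def get_lat_digit (digits : List Int) : Int :=
  get_lat_digit_go digits 0 0

-- ===== PORT B =====
-- surviving index of an n-element list, elimination starting from the left (true) / right (false)
def pvSurv : Nat → Bool → Nat
  | 0, _ => 0
  | 1, _ => 0
  | (n + 2), left =>
      let j := pvSurv ((n + 2) / 2) (!left)
      if left then 2 * j + 1 else 2 * j + (n + 2) % 2
termination_by n _ => n
decreasing_by
  omega

def get_lat_digit_alt (digits : List Int) : Int :=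
  (PySem.List.pyGet? digits ((pvSurv digits.length true : Nat) : Int)).getD 0

-- ===== PRECONDITION & SPEC =====
-- A ends by indexing the first element: the empty list raises IndexError and is excluded.
def Pre_get_lat_digit (digits : List Int) : Prop := digits ≠ []
instance (digits : List Int) : Decidable (Pre_get_lat_digit digits) := by
  unfold Pre_get_lat_digit; infer_instance

def pvWitness_get_lat_digit : List Int := [3, 1, 4, 1, 5]

def Spec_get_lat_digit (digits : List Int) (out : Int) : Prop := out = get_lat_digit_alt digits
instance (digits : List Int) (out : Int) : Decidable (Spec_get_lat_digit digits out) := by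
  unfold Spec_get_lat_digit; infer_instance

-- ===== CLAIM (what is proved, stated in full; the proofs are below) =====
def Claim_equal_get_lat_digit : Prop := ∀ (digits : List Int), Dom_get_lat_digit digits → Pre_get_lat_digit digits → Spec_get_lat_digit digits (get_lat_digit digits)

-- ===== LEMMAS AND PROOFS =====

theorem pvSurv_lt (n : Nat) (b : Bool) (h : 0 < n) : pvSurv n b < n := by
  induction n using Nat.strong_induction_on generalizing b with
  | _ n ih =>
    match n, h with
    | 1, _ => simp [pvSurv]
    | (m + 2), _ =>
      have hj := ih ((m + 2) / 2) (by omega) (!b) (by omega)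
      rw [pvSurv]
      split <;> omega

theorem goA_eq (n : Nat) : ∀ (digits : List Int), digits.length = n → 0 < n →
    ∀ (b : Bool) (s : Int),
      get_lat_digit_go digits (if b then 0 else 1) s = digits.getD (pvSurv n b) 0 := by
  induction n using Nat.strong_induction_on with
  | _ n ih =>
    intro digits hlen hpos b s
    by_cases h : 1 < n
    · -- at least two elements : one elimination round
      have hhalf : 0 < n / 2 := by omega
      cases b with
      | true =>
        rw [show (if (true : Bool) = true then (0 : Int) else 1) = 0 from rfl]
        rw [get_lat_digit_go, dif_pos (by omega : 1 < digits.length)]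
        rw [show (PySem.List.pyGet? ([1, -1] : List Int) 0).getD 0 = 1 from by decide]
        show get_lat_digit_go ((PySem.List.slice? ((PySem.List.slice?
            ((PySem.List.slice? digits none none 1).getD []) (some 1) none 2).getD [])
            none none 1).getD []) (1 - 0) (s + 1) = digits.getD (pvSurv n true) 0
        rw [pvSliceOne, Option.getD_some, pvSliceOddTwo, Option.getD_some, pvSliceOne,
          Option.getD_some]
        have hcall := ih (n / 2) (by omega)
          ((List.range (digits.length / 2)).map (fun k => digits.getD (2 * k + 1) 0))
          (by simp [hlen]) hhalf false (s + 1)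
        rw [show (if (false : Bool) = true then (0 : Int) else 1) = 1 from rfl] at hcall
        rw [show (1 : Int) - 0 = 1 from rfl, hcall]
        have hj := pvSurv_lt (n / 2) false hhalf
        have hlt : pvSurv (n / 2) false < ((List.range (digits.length / 2)).map
            (fun k => digits.getD (2 * k + 1) 0)).length := by
          simp [hlen]; omega
        rw [List.getD_eq_getElem _ _ hlt, List.getElem_map, List.getElem_range]
        have hsn : pvSurv n true = 2 * pvSurv (n / 2) false + 1 := by
          match n, h with
          | (m + 2), _ => rw [pvSurv]; simp
        rw [hsn]
      | false =>
        rw [show (if (false : Bool) = true then (0 : Int) else 1) = 1 from rfl]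
        rw [get_lat_digit_go, dif_pos (by omega : 1 < digits.length)]
        rw [show (PySem.List.pyGet? ([1, -1] : List Int) 1).getD 0 = -1 from by decide]
        show get_lat_digit_go ((PySem.List.slice? ((PySem.List.slice?
            ((PySem.List.slice? digits none none (-1)).getD []) (some 1) none 2).getD [])
            none none (-1)).getD []) (1 - 1) (s + 1) = digits.getD (pvSurv n false) 0
        rw [PySem.List.slice?_none_none_neg_one, Option.getD_some, pvSliceOddTwo,
          Option.getD_some, PySem.List.slice?_none_none_neg_one, Option.getD_some]
        set M := (List.range (digits.reverse.length / 2)).map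
          (fun k => digits.reverse.getD (2 * k + 1) 0) with hM
        have hMlen : M.length = n / 2 := by simp [hM, hlen]
        have hcall := ih (n / 2) (by omega) M.reverse (by simp [hMlen]) hhalf true (s + 1)
        rw [show (if (true : Bool) = true then (0 : Int) else 1) = 0 from rfl] at hcall
        rw [show (1 : Int) - 1 = 0 from rfl, hcall]
        have hj := pvSurv_lt (n / 2) true hhalf
        set J := pvSurv (n / 2) true with hJ
        have hJMr : J < M.reverse.length := by simp [hMlen]; omega
        have hrl : digits.reverse.length = n := by simp [hlen]
        have hsn : pvSurv n false = 2 * J + n % 2 := by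
          match n, h with
          | (m + 2), _ =>
            rw [pvSurv]
            simp [hJ]
        rw [List.getD_eq_getElem _ _ hJMr, List.getElem_reverse]
        simp only [hM, List.getElem_map, List.getElem_range, List.length_map,
          List.length_range, hrl]
        have h2 : 2 * (n / 2 - 1 - J) + 1 < digits.reverse.length := by rw [hrl]; omega
        rw [List.getD_eq_getElem _ _ h2, List.getElem_reverse]
        rw [hsn, List.getD_eq_getElem _ _ (show 2 * J + n % 2 < digits.length by
          rw [hlen]; omega)]
        congr 1
        omega
    · -- exactly one element
      have h1 : n = 1 := by omega
      rw [get_lat_digit_go, dif_neg (by omega)]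
      subst h1
      simp [pvSurv, PySem.List.pyGet?_zero, List.getD_eq_getElem?_getD]

-- ===== VERDICT (by name: the statement is the Claim_ definition above) =====
theorem get_lat_digit_spec : Claim_equal_get_lat_digit := by
  intro digits _ hpre
  unfold Spec_get_lat_digit get_lat_digit get_lat_digit_alt
  have hpos : 0 < digits.length := by
    cases digits with
    | nil => exact absurd rfl hpre
    | cons a t => simp
  have hmain := goA_eq digits.length digits rfl hpos true 0
  rw [show (if (true : Bool) = true then (0 : Int) else 1) = 0 from rfl] at hmain
  rw [hmain, PySem.List.pyGet?_natCast, ← List.getD_eq_getElem?_getD]
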